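-- pv_equiv track=rewrite | github.com/velazPabloes/adventjs2022 | retosPy/reto6/reto6.py | createCube
-- ===== SOURCE A (Python) =====
-- def createCube(size):
--     #Input: Tamaño del adorno.
--     #Output: String con el diseño del programa.
--     triangleTop = "/"  + "\\"
--     triangleBot = "\\" + "/"
--     lTop = "_" + "\\"
--     lBot = "_/"
--     res = ""
--     lsLinesTop = []
--     lsLinesBot = []
--     for e in range(1, size + 1):
--         lineTop = (" "*(size-e)) + (triangleTop*e) + (lTop*size)
--         lineBot = (" "*(size-e)) + (triangleBot*e) + (lBot*size)
--         lsLinesTop.append(lineTop)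
--         lsLinesBot.append(lineBot)
--     lsLinesTop.sort()
--     lsLinesBot.sort(reverse=True)
--     for e in lsLinesTop:
--         res+=(e+"\n")
--     for e in lsLinesBot:
--         res+=(e+"\n")
--     return res
-- ===== SOURCE B (Python) =====
-- def createCube(size):
--     top = [" " * (size - e) + "/\\" * e + "_\\" * size for e in range(1, size + 1)]
--     swap = str.maketrans("/\\", "\\/")
--     bottom = [line.translate(swap) for line in reversed(top)]
--     return "".join(line + "\n" for line in top + bottom)
-- ===== Notes on version B (the rewrite author's own statement) =====
-- stated objective: simpler
-- what changed: B builds only the top-half lines (already in order, so the sorts disappear) and derives the bottom half by translating each top line with a /↔\ character swap and emitting the translated lines in reversed order, joining everything once.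
import Mathlib
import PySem

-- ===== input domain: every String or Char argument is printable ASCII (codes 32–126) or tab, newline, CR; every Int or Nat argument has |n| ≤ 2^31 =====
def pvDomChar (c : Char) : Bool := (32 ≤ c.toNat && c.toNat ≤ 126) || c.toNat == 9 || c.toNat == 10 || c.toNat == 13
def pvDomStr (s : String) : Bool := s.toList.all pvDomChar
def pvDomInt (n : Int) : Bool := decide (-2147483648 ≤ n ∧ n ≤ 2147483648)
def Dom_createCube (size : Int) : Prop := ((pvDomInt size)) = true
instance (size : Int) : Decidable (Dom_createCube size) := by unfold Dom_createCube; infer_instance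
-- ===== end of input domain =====

-- B derives the bottom half by char-swapping the top lines and reversing them, instead of
-- building the bottom lines separately and sorting both halves (objective: simpler).

-- ===== PORT A =====
def createCube (size : Int) : String :=
  let triangleTop : List Char := ['/'] ++ ['\\']
  let triangleBot : List Char := ['\\'] ++ ['/']
  let lTop : List Char := ['_'] ++ ['\\']
  let lBot : List Char := ['_', '/']
  let st := (PySem.List.pyRange 1 (size + 1) 1).foldl
      (fun (acc : List (List Char) × List (List Char)) e =>
        let lineTop := PySem.List.pyRepeat [' '] (size - e) ++ PySem.List.pyRepeat triangleTop e
            ++ PySem.List.pyRepeat lTop size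
        let lineBot := PySem.List.pyRepeat [' '] (size - e) ++ PySem.List.pyRepeat triangleBot e
            ++ PySem.List.pyRepeat lBot size
        (acc.1 ++ [lineTop], acc.2 ++ [lineBot]))
      ([], [])
  let lsLinesTop := PySem.List.sorted st.1 (fun x => x) false
  let lsLinesBot := PySem.List.sorted st.2 (fun x => x) true
  let res := lsLinesTop.foldl (fun r e => r ++ (e ++ ['\n'])) []
  let res := lsLinesBot.foldl (fun r e => r ++ (e ++ ['\n'])) res
  String.ofList res

-- ===== PORT B =====
-- str.maketrans("/\\", "\\/") + translate, as a character map
def pvSwap (c : Char) : Char := if c = '/' then '\\' else if c = '\\' then '/' else c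

def createCube_alt (size : Int) : String :=
  let top := (PySem.List.pyRange 1 (size + 1) 1).map (fun e =>
    PySem.List.pyRepeat [' '] (size - e) ++ PySem.List.pyRepeat ['/', '\\'] e
      ++ PySem.List.pyRepeat ['_', '\\'] size)
  let bottom := top.reverse.map (fun line => line.map pvSwap)
  String.ofList (PySem.Chars.join [] ((top ++ bottom).map (fun line => line ++ ['\n'])))

-- ===== PRECONDITION & SPEC =====
def Spec_createCube (size : Int) (out : String) : Prop := out = createCube_alt size
instance (size : Int) (out : String) : Decidable (Spec_createCube size out) := by unfold Spec_createCube; infer_instance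

-- ===== CLAIM (what is proved, stated in full; the proofs are below) =====
def Claim_equal_createCube : Prop := ∀ (size : Int), Dom_createCube size → Spec_createCube size (createCube size)

-- ===== LEMMAS AND PROOFS =====

-- the top line for row e
def pvLineT (size e : Int) : List Char :=
  PySem.List.pyRepeat [' '] (size - e) ++ PySem.List.pyRepeat ['/', '\\'] e
    ++ PySem.List.pyRepeat ['_', '\\'] size

-- the bottom line for row e
def pvLineB (size e : Int) : List Char :=
  PySem.List.pyRepeat [' '] (size - e) ++ PySem.List.pyRepeat ['\\', '/'] e
    ++ PySem.List.pyRepeat ['_', '/'] size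

theorem pv_lineT_def (size e : Int) : PySem.List.pyRepeat [' '] (size - e)
    ++ PySem.List.pyRepeat ['/', '\\'] e ++ PySem.List.pyRepeat ['_', '\\'] size
    = pvLineT size e := rfl

theorem pv_lineB_def (size e : Int) : PySem.List.pyRepeat [' '] (size - e)
    ++ PySem.List.pyRepeat ['\\', '/'] e ++ PySem.List.pyRepeat ['_', '/'] size
    = pvLineB size e := rfl

theorem pv_map_pyRepeat {α β : Type} (f : α → β) (xs : List α) (n : Int) :
    (PySem.List.pyRepeat xs n).map f = PySem.List.pyRepeat (xs.map f) n := by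
  simp [PySem.List.pyRepeat, List.map_flatten]

theorem pv_lineB_eq_map (size e : Int) :
    pvLineB size e = (pvLineT size e).map pvSwap := by
  simp [pvLineT, pvLineB, pv_map_pyRepeat, pvSwap]

-- the accumulating loop builds exactly the two mapped lists
theorem pv_fold_build (size : Int) (l : List Int) (a b : List (List Char)) :
    l.foldl (fun (acc : List (List Char) × List (List Char)) e =>
        (acc.1 ++ [pvLineT size e], acc.2 ++ [pvLineB size e])) (a, b)
      = (a ++ l.map (pvLineT size), b ++ l.map (pvLineB size)) := by
  induction l generalizing a b with
  | nil => simp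
  | cons x t ih => simp [List.foldl_cons, ih]

theorem pv_fold_join (l : List (List Char)) (r : List Char) :
    l.foldl (fun r e => r ++ (e ++ ['\n'])) r
      = r ++ (l.map (fun e => e ++ ['\n'])).flatten := by
  induction l generalizing r with
  | nil => simp
  | cons x t ih => simp [List.foldl_cons, ih]

-- lexicographic order: a common prefix can be stripped
theorem pv_lex_append (c : Char) (k : Nat) {u v : List Char} (h : u < v) :
    List.replicate k c ++ u < List.replicate k c ++ v := by
  induction k with
  | zero => simpa using h
  | succ n ih => exact List.Lex.cons ih

theorem pv_repl_add (c : Char) (m n : Nat) :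
    List.replicate (m + n) c = List.replicate m c ++ List.replicate n c := by
  rw [List.replicate_add]

-- head of the repeated motif, for e ≥ 1
theorem pv_pyRepeat_pair_cons (x y : Char) (e : Int) (he : 1 ≤ e) :
    PySem.List.pyRepeat [x, y] e
      = x :: (y :: PySem.List.pyRepeat [x, y] (e - 1)) := by
  have h1 : e.toNat = (e - 1).toNat + 1 := by omega
  unfold PySem.List.pyRepeat
  rw [h1, List.replicate_succ, List.flatten_cons]
  rfl

theorem pv_lineT_mono (size a b : Int) (ha : 1 ≤ a) (hab : a < b) (hb : b ≤ size) :
    pvLineT size a < pvLineT size b := by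
  have hsp : (size - a).toNat = (size - b).toNat + (b - a).toNat := by omega
  have hba : (b - a).toNat = ((b - a).toNat - 1) + 1 := by omega
  unfold pvLineT
  rw [PySem.List.pyRepeat_singleton, PySem.List.pyRepeat_singleton, hsp,
    pv_repl_add, List.append_assoc,
    pv_pyRepeat_pair_cons '/' '\\' b (by omega), hba, List.replicate_succ]
  simp only [List.append_assoc, List.cons_append]
  apply pv_lex_append
  exact List.Lex.rel (by decide)

theorem pv_lineB_mono (size a b : Int) (ha : 1 ≤ a) (hab : a < b) (hb : b ≤ size) :
    pvLineB size a < pvLineB size b := by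
  have hsp : (size - a).toNat = (size - b).toNat + (b - a).toNat := by omega
  have hba : (b - a).toNat = ((b - a).toNat - 1) + 1 := by omega
  unfold pvLineB
  rw [PySem.List.pyRepeat_singleton, PySem.List.pyRepeat_singleton, hsp,
    pv_repl_add, List.append_assoc,
    pv_pyRepeat_pair_cons '\\' '/' b (by omega), hba, List.replicate_succ]
  simp only [List.append_assoc, List.cons_append]
  apply pv_lex_append
  exact List.Lex.rel (by decide)

theorem pv_top_pairwise (size : Int) :
    ((PySem.List.pyRange 1 (size + 1) 1).map (pvLineT size)).Pairwise (· < ·) := by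
  rw [List.pairwise_map]
  refine (PySem.List.pairwise_lt_pyRange_one 1 (size + 1)).imp_of_mem ?_
  intro a b hma hmb hab
  exact pv_lineT_mono size a b (PySem.List.mem_pyRange_one.mp hma).1 hab
    (by have := (PySem.List.mem_pyRange_one.mp hmb).2; omega)

theorem pv_bot_pairwise (size : Int) :
    ((PySem.List.pyRange 1 (size + 1) 1).map (pvLineB size)).Pairwise (· < ·) := by
  rw [List.pairwise_map]
  refine (PySem.List.pairwise_lt_pyRange_one 1 (size + 1)).imp_of_mem ?_
  intro a b hma hmb hab
  exact pv_lineB_mono size a b (PySem.List.mem_pyRange_one.mp hma).1 hab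
    (by have := (PySem.List.mem_pyRange_one.mp hmb).2; omega)

theorem pv_sorted_id_eq (xs ys : List (List Char)) (hp : ys.Perm xs)
    (hw : ys.Pairwise (· < ·)) :
    PySem.List.sorted xs (fun x => x) false = ys := by
  rw [Subsingleton.elim (fun (a b : List Char) => a.decidableLT b)
    (@LinearOrder.toDecidableLT _ List.instLinearOrder)]
  exact PySem.List.sorted_eq_of_perm_of_pairwise_lt xs ys (fun x => x) hp hw

theorem pv_sorted_id_rev_eq (xs ys : List (List Char)) (hp : ys.Perm xs)
    (hw : ys.Pairwise (fun a b => b < a)) :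
    PySem.List.sorted xs (fun x => x) true = ys := by
  rw [Subsingleton.elim (fun (a b : List Char) => a.decidableLT b)
    (@LinearOrder.toDecidableLT _ List.instLinearOrder)]
  exact PySem.List.sorted_rev_eq_of_perm_of_pairwise_gt xs ys (fun x => x) hp hw

theorem pv_join_nil (l : List (List Char)) : PySem.Chars.join [] l = l.flatten := by
  induction l with
  | nil => simp [PySem.Chars.join, List.intercalate]
  | cons x t ih =>
      cases t <;> simp_all [PySem.Chars.join, List.intercalate, List.intersperse]

-- ===== VERDICT (by name: the statement is the Claim_ definition above) =====
theorem createCube_spec : Claim_equal_createCube := by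
  intro size _
  unfold Spec_createCube
  simp only [createCube, createCube_alt, List.singleton_append]
  simp only [pv_lineT_def, pv_lineB_def]
  rw [pv_fold_build size (PySem.List.pyRange 1 (size + 1) 1) [] []]
  simp only [List.nil_append]
  rw [pv_sorted_id_eq _ _ (List.Perm.refl _) (pv_top_pairwise size),
      pv_sorted_id_rev_eq _ ((PySem.List.pyRange 1 (size + 1) 1).map (pvLineB size)).reverse
        (List.reverse_perm _) (by rw [List.pairwise_reverse]; exact pv_bot_pairwise size)]
  rw [pv_fold_join, pv_fold_join, pv_join_nil]
  apply congrArg String.ofList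
  simp [List.map_reverse, List.map_map, Function.comp_def, List.map_append,
    List.flatten_append, pv_lineB_eq_map]
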